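-- pv_equiv track=rewrite | github.com/parkcoool/Algorithm | 프로그래머스/3/42579. 베스트앨범/베스트앨범.py | solution
-- ===== SOURCE A (Python) =====
-- from collections import defaultdict
--
-- def solution(genres, plays):
--     genre_ids = defaultdict(list)
--     genre_plays = defaultdict(int)
--
--     for i in range(len(genres)):
--         genre_ids[genres[i]].append(i)
--         genre_plays[genres[i]] += plays[i]
--
--     sorted_genres = sorted(genre_ids.keys(), key=lambda genre: genre_plays[genre], reverse=True)
--
--     ans = []
--     for genre in sorted_genres:
--         ans += sorted(genre_ids[genre], key=lambda id: (-plays[id], id))[:2]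
--
--     return ans
-- ===== SOURCE B (Python) =====
-- def solution(genres, plays):
--     total = {}
--     first = {}
--     for i, g in enumerate(genres):
--         if g not in total:
--             total[g] = 0
--             first[g] = i
--         total[g] += plays[i]
--     # radix-style: stable-sort all song indices by song key, then by genre key
--     order = sorted(range(len(genres)), key=lambda i: (-plays[i], i))
--     order = sorted(order, key=lambda i: (-total[genres[i]], first[genres[i]]))
--     picked = []
--     count = {}
--     for i in order:
--         g = genres[i]
--         c = count.get(g, 0)
--         if c < 2:
--             picked.append(i)
--             count[g] = c + 1
--     return picked
-- ===== Notes on version B (the rewrite author's own statement) =====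
-- stated objective: alternative
-- what changed: A groups songs per genre in a dict of lists, sorts the genres, then sorts each genre's list separately and concatenates the top-2 slices; B never builds per-genre lists: it accumulates per-genre totals and first-appearance indices in one pass, performs a single global sort of all song indices by the composite key (-genre_total, genre_first_index, -plays, index), and one linear counting pass keeps the first two songs of each genre.
import Mathlib
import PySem

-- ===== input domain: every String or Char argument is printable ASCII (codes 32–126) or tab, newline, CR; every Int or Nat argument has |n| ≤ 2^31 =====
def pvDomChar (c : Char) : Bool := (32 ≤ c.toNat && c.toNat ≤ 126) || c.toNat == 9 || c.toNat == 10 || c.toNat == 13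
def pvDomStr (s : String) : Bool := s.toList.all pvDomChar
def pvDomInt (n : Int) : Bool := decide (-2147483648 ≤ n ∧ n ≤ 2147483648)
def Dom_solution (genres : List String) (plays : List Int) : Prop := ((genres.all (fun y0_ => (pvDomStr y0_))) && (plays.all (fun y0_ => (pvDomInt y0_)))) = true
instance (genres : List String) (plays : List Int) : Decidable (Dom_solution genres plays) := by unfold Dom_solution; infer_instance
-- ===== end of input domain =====

-- B replaces A's group-then-sort-each-genre decomposition by one global sort of all
-- song indices under a composite key plus a linear counting pass (objective: alternative).

-- ===== PORT A =====
def solution (genres : List String) (plays : List Int) : List Int :=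
  -- for i in range(len(genres)): genre_ids[genres[i]].append(i); genre_plays[genres[i]] += plays[i]
  let st :=
    (PySem.List.pyRange 0 (genres.length : Int) 1).foldl
      (fun (st : PySem.Dict String (List Int) × PySem.Dict String Int) i =>
        let g := PySem.List.pyGetD genres i ""
        (st.1.modify g [] (fun l => l ++ [i]),
         st.2.modify g 0 (fun t => t + PySem.List.pyGetD plays i 0)))
      (PySem.Dict.mk [], PySem.Dict.mk [])
  let genre_ids := st.1
  let genre_plays := st.2
  let sorted_genres :=
    PySem.List.sorted genre_ids.keys (fun genre => genre_plays.getD genre 0) true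
  -- for genre in sorted_genres: ans += sorted(genre_ids[genre], key=...)[:2]
  sorted_genres.foldl
    (fun ans genre =>
      ans ++ PySem.List.slice
        (PySem.List.sorted2 (genre_ids.getD genre [])
          (fun id => -(PySem.List.pyGetD plays id 0)) (fun id => id) false)
        none (some 2))
    []

-- ===== PORT B =====
def solution_alt (genres : List String) (plays : List Int) : List Int :=
  -- one pass: per-genre total plays and first-appearance index
  let tf :=
    (PySem.List.enumerate genres 0).foldl
      (fun (tf : PySem.Dict String Int × PySem.Dict String Int) p =>
        let tf := if tf.1.contains p.2 then tf
                  else (tf.1.insert p.2 0, tf.2.insert p.2 p.1)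
        (tf.1.modify p.2 0 (fun t => t + PySem.List.pyGetD plays p.1 0), tf.2))
      (PySem.Dict.mk [], PySem.Dict.mk [])
  let total := tf.1
  let first := tf.2
  -- radix-style: stable-sort all song indices by song key, then by genre key
  let order :=
    PySem.List.sorted2 (PySem.List.pyRange 0 (genres.length : Int) 1)
      (fun i => -(PySem.List.pyGetD plays i 0)) (fun i => i) false
  let order :=
    PySem.List.sorted2 order
      (fun i => -(total.getD (PySem.List.pyGetD genres i "") 0))
      (fun i => first.getD (PySem.List.pyGetD genres i "") 0) false
  -- one counting pass keeps the first two indices of each genre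
  (order.foldl
    (fun (st : List Int × PySem.Dict String Int) i =>
      let g := PySem.List.pyGetD genres i ""
      let c := st.2.getD g 0
      if c < 2 then (st.1 ++ [i], st.2.insert g (c + 1)) else st)
    ([], PySem.Dict.mk [])).1

-- ===== PRECONDITION & SPEC =====
-- Pre_ excludes only the inputs where A raises IndexError: plays shorter than genres.
def Pre_solution (genres : List String) (plays : List Int) : Prop :=
  genres.length ≤ plays.length
instance (genres : List String) (plays : List Int) : Decidable (Pre_solution genres plays) := by
  unfold Pre_solution; infer_instance

def pvWitness_solution : List String × List Int :=
  (["rock", "pop", "rock", "pop", "rock"], [500, 600, 150, 600, 800])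

def Spec_solution (genres : List String) (plays : List Int) (out : List Int) : Prop := out = solution_alt genres plays
instance (genres : List String) (plays : List Int) (out : List Int) : Decidable (Spec_solution genres plays out) := by unfold Spec_solution; infer_instance

-- ===== CLAIM (what is proved, stated in full; the proofs are below) =====
def Claim_equal_solution : Prop := ∀ (genres : List String) (plays : List Int), Dom_solution genres plays → Pre_solution genres plays → Spec_solution genres plays (solution genres plays)

-- ===== LEMMAS AND PROOFS =====

theorem pvInsertBy_congr {α : Type} (b1 b2 : α → α → Bool) (x : α) (acc : List α)
    (h : ∀ y ∈ acc, b1 x y = b2 x y) :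
    PySem.List.insertBy b1 x acc = PySem.List.insertBy b2 x acc := by
  induction acc with
  | nil => rfl
  | cons y ys ih =>
    simp only [PySem.List.insertBy]
    rw [h y (by simp)]
    by_cases hb : b2 x y = true
    · simp [hb]
    · simp only [Bool.not_eq_true] at hb
      simp [hb, ih (fun z hz => h z (by simp [hz]))]

theorem pvFoldl_insertBy_congr {α : Type} (b1 b2 : α → α → Bool) :
    ∀ (l acc : List α),
    (∀ x ∈ l, ∀ y, (y ∈ acc ∨ y ∈ l) → b1 x y = b2 x y) →
    l.foldl (fun acc x => PySem.List.insertBy b1 x acc) acc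
      = l.foldl (fun acc x => PySem.List.insertBy b2 x acc) acc := by
  intro l
  induction l with
  | nil => intro acc _; rfl
  | cons x t ih =>
    intro acc h
    simp only [List.foldl_cons]
    rw [pvInsertBy_congr b1 b2 x acc (fun y hy => h x (by simp) y (Or.inl hy))]
    apply ih
    intro z hz y hy
    apply h z (by simp [hz])
    rcases hy with hy | hy
    · rw [PySem.List.insertBy_mem_iff] at hy
      rcases hy with rfl | hy
      · exact Or.inr (by simp)
      · exact Or.inl hy
    · exact Or.inr (by simp [hy])

theorem pvSorted_key_congr {α κ : Type} [LT κ] [DecidableLT κ] (xs : List α)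
    (k k' : α → κ) (rev : Bool) (h : ∀ x ∈ xs, k x = k' x) :
    PySem.List.sorted xs k rev = PySem.List.sorted xs k' rev := by
  cases rev
  · simp only [PySem.List.sorted, Bool.false_eq_true, reduceIte]
    apply pvFoldl_insertBy_congr; intro x hx y hy
    rcases hy with hy | hy
    · simp at hy
    · rw [h x hx, h y hy]
  · simp only [PySem.List.sorted, reduceIte]
    apply pvFoldl_insertBy_congr; intro x hx y hy
    rcases hy with hy | hy
    · simp at hy
    · rw [h x hx, h y hy]

theorem pvSorted2_eq_sorted_toLex {α : Type} (xs : List α) (k1 k2 : α → Int) (rev : Bool) :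
    PySem.List.sorted2 xs k1 k2 rev
      = PySem.List.sorted xs (fun x => toLex (k1 x, k2 x)) rev := by
  have hb : ∀ a b : α,
      (decide (k1 a < k1 b) || (!decide (k1 b < k1 a) && decide (k2 a < k2 b)))
        = decide (toLex (k1 a, k2 a) < toLex (k1 b, k2 b)) := by
    intro a b
    rcases lt_trichotomy (k1 a) (k1 b) with h | h | h
    · simp [h, Prod.Lex.lt_iff, not_lt_of_gt h]
    · simp [h, Prod.Lex.lt_iff]
    · simp [h, not_lt_of_gt h, Prod.Lex.lt_iff, ne_of_gt h]
  cases rev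
  · simp only [PySem.List.sorted2, PySem.List.sorted, Bool.false_eq_true, reduceIte]
    have he : (fun a b : α => decide (k1 a < k1 b) || (!decide (k1 b < k1 a) && decide (k2 a < k2 b)))
        = fun a b => decide (toLex (k1 a, k2 a) < toLex (k1 b, k2 b)) := by
      funext a b; exact hb a b
    rw [he]
  · simp only [PySem.List.sorted2, PySem.List.sorted, reduceIte]
    have he : (fun a b : α => decide (k1 b < k1 a) || (!decide (k1 a < k1 b) && decide (k2 b < k2 a)))
        = fun a b => decide (toLex (k1 b, k2 b) < toLex (k1 a, k2 a)) := by
      funext a b; exact hb b a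
    rw [he]

theorem pvEq_of_perm_of_pairwise_asymm {α : Type} {r : α → α → Prop}
    (hasym : ∀ a b, r a b → ¬ r b a) :
    ∀ (l1 l2 : List α), l1.Perm l2 → l1.Pairwise r → l2.Pairwise r → l1 = l2 := by
  intro l1
  induction l1 with
  | nil => intro l2 hp _ _; exact hp.nil_eq
  | cons a t1 ih =>
    intro l2 hp h1 h2
    cases l2 with
    | nil => exact absurd hp.symm (by simp)
    | cons b t2 =>
      by_cases hab : a = b
      · subst hab
        rw [ih t2 (hp.cons_inv) h1.tail h2.tail]
      · exfalso
        have ha2 : a ∈ b :: t2 := hp.mem_iff.mp (by simp)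
        have hb1 : b ∈ a :: t1 := hp.mem_iff.mpr (by simp)
        have hat2 : a ∈ t2 := by
          cases ha2 with
          | head => exact absurd rfl hab
          | tail _ h => exact h
        have hbt1 : b ∈ t1 := by
          cases hb1 with
          | head => exact absurd rfl (fun e => hab e.symm)
          | tail _ h => exact h
        exact hasym a b ((List.pairwise_cons.mp h1).1 b hbt1) ((List.pairwise_cons.mp h2).1 a hat2)

theorem pvInsertBy_stable_pairwise {α : Type} (r : α → α → Prop) (before : α → α → Bool)
    (x : α) :
    ∀ (acc : List α), acc.Pairwise r →
    (∀ y ∈ acc, (before x y = true → r x y) ∧ (before x y = false → r y x)) →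
    (∀ y z, before x y = true → r y z → r x z) →
    (PySem.List.insertBy before x acc).Pairwise r := by
  intro acc
  induction acc with
  | nil => intro _ _ _; simp [PySem.List.insertBy]
  | cons y ys ih =>
    intro hacc hx htr
    simp only [PySem.List.insertBy]
    by_cases hb : before x y = true
    · simp only [hb, if_true]
      refine List.pairwise_cons.mpr ⟨?_, hacc⟩
      intro z hz
      rcases hz with _ | hz
      · exact (hx y (by simp)).1 hb
      · exact htr y z hb ((List.pairwise_cons.mp hacc).1 z (by assumption))
    · simp only [hb]
      refine List.pairwise_cons.mpr ⟨?_, ?_⟩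
      · intro z hz
        rw [PySem.List.insertBy_mem_iff] at hz
        rcases hz with rfl | hz
        · exact (hx y (by simp)).2 (by simpa using hb)
        · exact (List.pairwise_cons.mp hacc).1 z hz
      · exact ih hacc.tail (fun z hz => hx z (by simp [hz])) htr

theorem pvFoldl_insertBy_stable {α κ' : Type} [LinearOrder κ'] (r : α → α → Prop)
    (before : α → α → Bool) (pos : α → κ')
    (hb1 : ∀ a b, before a b = true → r a b)
    (hb2 : ∀ a b, pos b < pos a → before a b = false → r b a)
    (htr : ∀ x y z, before x y = true → r y z → r x z) :
    ∀ (l acc : List α), l.Pairwise (fun a b => pos a < pos b) →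
    acc.Pairwise r → (∀ y ∈ acc, ∀ x ∈ l, pos y < pos x) →
    (l.foldl (fun acc x => PySem.List.insertBy before x acc) acc).Pairwise r := by
  intro l
  induction l with
  | nil => intro acc _ hacc _; simpa using hacc
  | cons x t ih =>
    intro acc hl hacc hcross
    simp only [List.foldl_cons]
    apply ih _ hl.tail
    · apply pvInsertBy_stable_pairwise r before x acc hacc
      · intro y hy
        exact ⟨hb1 x y, hb2 x y (hcross y hy x (by simp))⟩
      · exact fun y z h1 h2 => htr x y z h1 h2
    · intro y hy z hz
      rw [PySem.List.insertBy_mem_iff] at hy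
      rcases hy with rfl | hy
      · exact (List.pairwise_cons.mp hl).1 z hz
      · exact lt_trans (hcross y hy x (by simp)) ((List.pairwise_cons.mp hl).1 z hz)

theorem pvSorted_stable_asc {α κ κ' : Type} [LinearOrder κ] [LinearOrder κ']
    (xs : List α) (key : α → κ) (pos : α → κ')
    (h : xs.Pairwise (fun a b => pos a < pos b)) :
    (PySem.List.sorted xs key false).Pairwise
      (fun a b => key a < key b ∨ (key a = key b ∧ pos a < pos b)) := by
  rw [show PySem.List.sorted xs key false = PySem.List.sorted xs key from rfl,
    PySem.List.sorted_eq_foldl_insertBy]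
  apply pvFoldl_insertBy_stable _ _ pos _ _ _ xs [] h (by simp) (by simp)
  · intro a b hb; left; simpa using hb
  · intro a b hpos hb
    simp only [decide_eq_false_iff_not, not_lt] at hb
    rcases lt_or_eq_of_le hb with h' | h'
    · exact Or.inl h'
    · exact Or.inr ⟨h', hpos⟩
  · intro x y z h1 h2
    simp only [decide_eq_true_eq] at h1
    rcases h2 with h2 | ⟨h2, _⟩
    · exact Or.inl (lt_trans h1 h2)
    · exact Or.inl (h2 ▸ h1)

theorem pvSorted_stable_desc {α κ κ' : Type} [LinearOrder κ] [LinearOrder κ']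
    (xs : List α) (key : α → κ) (pos : α → κ')
    (h : xs.Pairwise (fun a b => pos a < pos b)) :
    (PySem.List.sorted xs key true).Pairwise
      (fun a b => key b < key a ∨ (key a = key b ∧ pos a < pos b)) := by
  rw [PySem.List.sorted_rev_eq_foldl_insertBy]
  apply pvFoldl_insertBy_stable _ _ pos _ _ _ xs [] h (by simp) (by simp)
  · intro a b hb; left; simpa using hb
  · intro a b hpos hb
    simp only [decide_eq_false_iff_not, not_lt] at hb
    rcases lt_or_eq_of_le hb with h' | h'
    · exact Or.inl h'
    · exact Or.inr ⟨h'.symm, hpos⟩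
  · intro x y z h1 h2
    simp only [decide_eq_true_eq] at h1
    rcases h2 with h2 | ⟨h2, _⟩
    · exact Or.inl (lt_trans h2 h1)
    · exact Or.inl (h2 ▸ h1)

theorem pvPairwise_strict_of_le_of_nodup {α κ : Type} [LinearOrder κ] (l : List α)
    (key : α → κ) (hinj : ∀ a b, key a = key b → a = b)
    (hle : l.Pairwise (fun a b => key a ≤ key b)) (hnd : l.Nodup) :
    l.Pairwise (fun a b => key a < key b) := by
  refine (hle.and hnd).imp ?_
  rintro a b ⟨h1, h2⟩
  rcases lt_or_eq_of_le h1 with h | h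
  · exact h
  · exact absurd (hinj a b h) h2

theorem pvFlatten_filter_perm {α β : Type} [BEq α] [LawfulBEq α] (f : β → α) :
    ∀ (gs : List α) (R : List β), gs.Nodup → (∀ x ∈ R, f x ∈ gs) →
    ((gs.map (fun g => R.filter (fun x => f x == g))).flatten).Perm R := by
  intro gs
  induction gs with
  | nil =>
    intro R _ hcov
    have : R = [] := by
      cases R with
      | nil => rfl
      | cons x t => exact absurd (hcov x (by simp)) (by simp)
    simp [this]
  | cons g t ih =>
    intro R hnd hcov
    simp only [List.map_cons, List.flatten_cons]
    have hrw : t.map (fun h => R.filter (fun x => f x == h))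
        = t.map (fun h => (R.filter (fun x => !(f x == g))).filter (fun x => f x == h)) := by
      apply List.map_congr_left
      intro h hh
      rw [List.filter_filter]
      apply List.filter_congr
      intro x hx
      by_cases he : f x = h
      · have : ¬ (f x == g) = true := by
          simp only [beq_iff_eq, he]
          intro hgh
          exact (List.nodup_cons.mp hnd).1 (hgh ▸ hh)
        simp [he] at this ⊢
        simp [this]
      · simp [he]
    rw [hrw]
    have hcov' : ∀ x ∈ R.filter (fun x => !(f x == g)), f x ∈ t := by
      intro x hx
      have hx1 := List.mem_filter.mp hx
      rcases List.mem_cons.mp (hcov x hx1.1) with h | h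
      · rw [h] at hx1; simp at hx1
      · exact h
    have hperm := ih (R.filter (fun x => !(f x == g))) (List.nodup_cons.mp hnd).2 hcov'
    exact (List.Perm.append_left _ hperm).trans (List.filter_append_perm _ R)

def pvGAt (genres : List String) (i : Int) : String := PySem.List.pyGetD genres i ""
def pvPAt (plays : List Int) (i : Int) : Int := PySem.List.pyGetD plays i 0
def pvR (genres : List String) : List Int := PySem.List.pyRange 0 (genres.length : Int) 1
def pvIds (genres : List String) (g : String) : List Int :=
  (pvR genres).filter (fun i => pvGAt genres i == g)
def pvTot (genres : List String) (plays : List Int) (g : String) : Int :=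
  ((pvIds genres g).map (pvPAt plays)).sum
def pvFst (genres : List String) (g : String) : Int := (pvIds genres g).headD 0
def pvGs (genres : List String) : List String := PySem.List.dedup genres
def pvSortIds (genres : List String) (plays : List Int) (g : String) : List Int :=
  PySem.List.sorted2 (pvIds genres g) (fun i => -(pvPAt plays i)) (fun i => i) false
def pvSG (genres : List String) (plays : List Int) : List String :=
  PySem.List.sorted (pvGs genres) (fun g => pvTot genres plays g) true

theorem pvR_pairwise (genres : List String) : (pvR genres).Pairwise (· < ·) := by
  unfold pvR
  simp only [PySem.List.pyRange]
  split
  · simp_all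
  · apply List.Pairwise.map
    case H => exact fun a b (h : a < b) => by omega
    exact List.pairwise_lt_range

theorem pvR_nodup (genres : List String) : (pvR genres).Nodup :=
  (pvR_pairwise genres).imp (fun h => ne_of_lt h)

theorem pvIds_nodup (genres : List String) (g : String) : (pvIds genres g).Nodup :=
  (pvR_nodup genres).filter _

theorem pvMem_R (genres : List String) (i : Int) :
    i ∈ pvR genres ↔ 0 ≤ i ∧ i < (genres.length : Int) := by
  unfold pvR
  exact PySem.List.mem_pyRange_one

theorem pvMem_ids (genres : List String) (g : String) (i : Int) :
    i ∈ pvIds genres g ↔ i ∈ pvR genres ∧ pvGAt genres i = g := by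
  unfold pvIds
  simp [List.mem_filter]

theorem pvGAt_mem (genres : List String) (i : Int) (h : i ∈ pvR genres) :
    pvGAt genres i ∈ genres := by
  rw [pvMem_R] at h
  unfold pvGAt
  have hm : i ∈ PySem.List.pyRange 0 (PySem.List.len genres) := by
    rw [show PySem.List.len genres = (genres.length : Int) from rfl]
    exact (pvMem_R genres i).mpr h
  have := List.mem_map_of_mem (f := fun j => PySem.List.pyGetD genres j "") hm
  rwa [PySem.List.map_pyGetD_pyRange_zero] at this

theorem pvMem_genres_iff (genres : List String) (g : String) :
    g ∈ genres ↔ ∃ i ∈ pvR genres, pvGAt genres i = g := by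
  constructor
  · intro h
    rw [← PySem.List.map_pyGetD_pyRange_zero genres ""] at h
    rcases List.mem_map.mp h with ⟨i, hi, he⟩
    refine ⟨i, ?_, he⟩
    rw [show PySem.List.len genres = (genres.length : Int) from rfl] at hi
    exact hi
  · rintro ⟨i, hi, rfl⟩
    exact pvGAt_mem genres i hi

theorem pvIds_ne_nil_iff (genres : List String) (g : String) :
    pvIds genres g ≠ [] ↔ g ∈ genres := by
  rw [pvMem_genres_iff]
  rw [← List.isEmpty_eq_false_iff, List.isEmpty_eq_false_iff_exists_mem]
  constructor
  · rintro ⟨i, hi⟩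
    rw [pvMem_ids] at hi
    exact ⟨i, hi.1, hi.2⟩
  · rintro ⟨i, hi, he⟩
    exact ⟨i, (pvMem_ids genres g i).mpr ⟨hi, he⟩⟩

theorem pvHeadD_mem {α : Type} (l : List α) (d : α) (h : l ≠ []) : l.headD d ∈ l := by
  cases l with
  | nil => exact absurd rfl h
  | cons x t => simp

theorem pvHeadD_append_left {α : Type} (l t : List α) (d : α) (h : l ≠ []) :
    (l ++ t).headD d = l.headD d := by
  cases l with
  | nil => exact absurd rfl h
  | cons x xs => rfl

theorem pvFst_mem (genres : List String) (g : String) (h : g ∈ genres) :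
    pvFst genres g ∈ pvIds genres g :=
  pvHeadD_mem _ _ ((pvIds_ne_nil_iff genres g).mpr h)

theorem pvGAt_append_left (gl : List String) (x : String) (i : Int) (h : 0 ≤ i ∧ i < (gl.length : Int)) :
    pvGAt (gl ++ [x]) i = pvGAt gl i := by
  unfold pvGAt
  obtain ⟨k, rfl⟩ : ∃ k : Nat, i = (k : Int) := ⟨i.toNat, by omega⟩
  rw [PySem.List.pyGetD_natCast, PySem.List.pyGetD_natCast]
  rw [List.getD_append]
  omega

theorem pvGAt_append_last (gl : List String) (x : String) :
    pvGAt (gl ++ [x]) (gl.length : Int) = x := by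
  unfold pvGAt
  rw [PySem.List.pyGetD_natCast]
  simp [List.getD_eq_getElem?_getD]

theorem pvR_append (gl : List String) (x : String) :
    pvR (gl ++ [x]) = pvR gl ++ [(gl.length : Int)] := by
  unfold pvR
  have h1 : ((gl ++ [x]).length : Int) = (gl.length : Int) + 1 := by simp
  rw [h1]
  exact PySem.List.pyRange_one_succ_right (by positivity)

theorem pvIds_append (gl : List String) (x : String) (g : String) :
    pvIds (gl ++ [x]) g
      = pvIds gl g ++ (if x = g then [(gl.length : Int)] else []) := by
  unfold pvIds
  rw [pvR_append, List.filter_append]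
  congr 1
  · apply List.filter_congr
    intro i hi
    rw [pvGAt_append_left gl x i ((pvMem_R gl i).mp hi)]
  · simp only [List.filter_cons, List.filter_nil]
    rw [pvGAt_append_last]
    by_cases h : x = g <;> simp [h]

theorem pvTot_append (gl : List String) (plays : List Int) (x : String) (g : String) :
    pvTot (gl ++ [x]) plays g
      = pvTot gl plays g + (if x = g then pvPAt plays (gl.length : Int) else 0) := by
  unfold pvTot
  rw [pvIds_append]
  by_cases h : x = g <;> simp [h]

theorem pvFst_append_of_mem (gl : List String) (x : String) (g : String) (h : g ∈ gl) :
    pvFst (gl ++ [x]) g = pvFst gl g := by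
  unfold pvFst
  rw [pvIds_append]
  exact pvHeadD_append_left _ _ _ ((pvIds_ne_nil_iff gl g).mpr h)

theorem pvFst_append_last (gl : List String) (x : String) (h : x ∉ gl) :
    pvFst (gl ++ [x]) x = (gl.length : Int) := by
  unfold pvFst
  rw [pvIds_append]
  have : pvIds gl x = [] := by
    by_contra hne
    exact h ((pvIds_ne_nil_iff gl x).mp hne)
  simp [this]

theorem pvFst_lt_len (gl : List String) (g : String) (h : g ∈ gl) :
    pvFst gl g < (gl.length : Int) :=
  ((pvMem_R gl _).mp ((pvMem_ids gl g _).mp (pvFst_mem gl g h)).1).2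

theorem pvGs_append (gl : List String) (x : String) :
    pvGs (gl ++ [x]) = if x ∈ gl then pvGs gl else pvGs gl ++ [x] := by
  unfold pvGs
  rw [PySem.List.dedup_eq_ofList, PySem.List.dedup_eq_ofList,
    PySem.Set.ofList_eq_foldl, PySem.Set.ofList_eq_foldl, List.foldl_append]
  simp only [List.foldl_cons, List.foldl_nil]
  rw [← PySem.Set.ofList_eq_foldl]
  have hc : PySem.Set.contains (PySem.Set.ofList gl) x = List.contains (PySem.Set.ofList gl) x := rfl
  show PySem.Set.add (PySem.Set.ofList gl) x = _
  rw [show PySem.Set.add (PySem.Set.ofList gl) x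
      = if (PySem.Set.ofList gl).contains x = true then PySem.Set.ofList gl
        else PySem.Set.ofList gl ++ [x] from rfl]
  by_cases h : x ∈ gl
  · rw [if_pos, if_pos h]
    rw [hc, List.contains_iff_mem]
    exact (PySem.Set.mem_ofList gl x).mpr h
  · rw [if_neg, if_neg h]
    rw [hc, List.contains_iff_mem]
    intro hmem
    exact h ((PySem.Set.mem_ofList gl x).mp hmem)

theorem pvMem_gs (genres : List String) (g : String) : g ∈ pvGs genres ↔ g ∈ genres :=
  PySem.List.mem_dedup genres g

theorem pvGs_pairwise_fst (gl : List String) :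
    (pvGs gl).Pairwise (fun a b => pvFst gl a < pvFst gl b) := by
  induction gl using List.reverseRecOn with
  | nil => simp [pvGs, PySem.List.dedup]
  | append_singleton l x ih =>
    rw [pvGs_append]
    by_cases h : x ∈ l
    · rw [if_pos h]
      apply ih.imp_of_mem
      intro a b ha hb hr
      rw [pvFst_append_of_mem l x a ((pvMem_gs l a).mp ha),
          pvFst_append_of_mem l x b ((pvMem_gs l b).mp hb)]
      exact hr
    · rw [if_neg h]
      rw [List.pairwise_append]
      refine ⟨?_, by simp, ?_⟩
      · apply ih.imp_of_mem
        intro a b ha hb hr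
        rw [pvFst_append_of_mem l x a ((pvMem_gs l a).mp ha),
            pvFst_append_of_mem l x b ((pvMem_gs l b).mp hb)]
        exact hr
      · intro a ha b hb
        rw [List.mem_singleton] at hb
        rw [hb]
        rw [pvFst_append_of_mem l x a ((pvMem_gs l a).mp ha), pvFst_append_last l x h]
        exact pvFst_lt_len l a ((pvMem_gs l a).mp ha)

theorem pvEnum_filter_map (gl : List String) (g : String) :
    ((PySem.List.enumerate gl 0).filter (fun p => p.2 == g)).map (fun p => p.1)
      = pvIds gl g := by
  rw [PySem.List.enumerate_eq_map_pyRange gl ""]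
  rw [List.filter_map, List.map_map]
  show List.map (fun j => j) _ = _
  rw [List.map_id']
  rfl

theorem pvGetD_foldl_modify_add {κ β : Type} [BEq κ] [LawfulBEq κ] [DecidableEq κ]
    (key : β → κ) (w : β → Int) :
    ∀ (l : List β) (d : PySem.Dict κ Int) (c : κ),
    (l.foldl (fun d x => d.modify (key x) 0 (fun t => t + w x)) d).getD c 0
      = d.getD c 0 + ((l.filter (fun x => key x == c)).map w).sum := by
  intro l
  induction l with
  | nil => intro d c; simp
  | cons x t ih =>
    intro d c
    simp only [List.foldl_cons]
    rw [ih]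
    rw [PySem.Dict.getD_modify]
    by_cases h : c = key x
    · subst h
      simp only [beq_self_eq_true, List.filter_cons_of_pos, List.map_cons, List.sum_cons,
        reduceIte]
      ring
    · rw [if_neg h]
      have hne : ¬ ((key x == c) = true) := by simpa using fun e => h e.symm
      simp [hne]

def pvAFold (genres : List String) (plays : List Int) :
    PySem.Dict String (List Int) × PySem.Dict String Int :=
  (PySem.List.pyRange 0 (genres.length : Int) 1).foldl
    (fun (st : PySem.Dict String (List Int) × PySem.Dict String Int) i =>
      (st.1.modify (PySem.List.pyGetD genres i "") [] (fun l => l ++ [i]),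
       st.2.modify (PySem.List.pyGetD genres i "") 0
         (fun t => t + PySem.List.pyGetD plays i 0)))
    (PySem.Dict.mk [], PySem.Dict.mk [])

theorem pvR_eq_map_fst_enum (genres : List String) :
    PySem.List.pyRange 0 (genres.length : Int) 1
      = (PySem.List.enumerate genres 0).map (fun p => p.1) := by
  rw [PySem.List.map_fst_enumerate genres 0]
  norm_num

theorem pvGAt_enum (genres : List String) (p : Int × String)
    (hp : p ∈ PySem.List.enumerate genres 0) : pvGAt genres p.1 = p.2 := by
  rw [PySem.List.mem_enumerate_iff] at hp
  obtain ⟨k, hk, rfl⟩ := hp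
  unfold pvGAt
  simp only [zero_add]
  rw [PySem.List.pyGetD_natCast]
  exact List.getD_eq_getElem genres "" hk

theorem pvAFold_eq (genres : List String) (plays : List Int) :
    pvAFold genres plays
      = ((PySem.List.enumerate genres 0).foldl
            (fun d p => d.modify p.2 [] (fun l => l ++ [p.1])) (PySem.Dict.mk []),
         (PySem.List.enumerate genres 0).foldl
            (fun d p => d.modify p.2 0 (fun t => t + PySem.List.pyGetD plays p.1 0))
            (PySem.Dict.mk [])) := by
  unfold pvAFold
  have h1 := PySem.List.foldl_prod_mk
    (fun (d : PySem.Dict String (List Int)) (i : Int) =>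
      d.modify (PySem.List.pyGetD genres i "") [] (fun l => l ++ [i]))
    (fun (d : PySem.Dict String Int) (i : Int) =>
      d.modify (PySem.List.pyGetD genres i "") 0 (fun t => t + PySem.List.pyGetD plays i 0))
    (PySem.List.pyRange 0 (genres.length : Int) 1)
    (PySem.Dict.mk []) (PySem.Dict.mk [])
  refine Eq.trans h1 ?_
  rw [pvR_eq_map_fst_enum, List.foldl_map, List.foldl_map]
  refine congrArg₂ Prod.mk ?_ ?_ <;>
    (apply PySem.List.foldl_congr_mem; intro acc p hp;
     rw [show PySem.List.pyGetD genres p.1 "" = pvGAt genres p.1 from rfl,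
       pvGAt_enum genres p hp])

theorem pvAFold_ids_getD (genres : List String) (plays : List Int) (g : String) :
    (pvAFold genres plays).1.getD g [] = pvIds genres g := by
  rw [pvAFold_eq]
  show ((PySem.List.enumerate genres 0).foldl
      (fun d p => d.modify p.2 [] (fun l => l ++ [p.1])) (PySem.Dict.mk [])).getD g [] = _
  have hswap : ((PySem.List.enumerate genres 0).foldl
      (fun d p => d.modify p.2 [] (fun l => l ++ [p.1])) (PySem.Dict.mk []))
    = (((PySem.List.enumerate genres 0).map (fun p => (p.2, p.1))).foldl
      (fun d q => d.modify q.1 [] (fun l => l ++ [q.2])) (PySem.Dict.mk [])) :=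
    (List.foldl_map (f := fun p : Int × String => (p.2, p.1))
      (g := fun (d : PySem.Dict String (List Int)) (q : String × Int) =>
        d.modify q.1 [] (fun l => l ++ [q.2]))
      (l := PySem.List.enumerate genres 0)
      (init := (PySem.Dict.mk [] : PySem.Dict String (List Int)))).symm
  rw [hswap]
  rw [PySem.Dict.getD_foldl_modify_append]
  rw [List.filter_map, List.map_map]
  have : (PySem.Dict.mk [] : PySem.Dict String (List Int)).getD g [] = [] := by
    simp [PySem.Dict.getD_eq_get?_getD, PySem.Dict.get?]
  rw [this, List.nil_append]
  rw [← pvEnum_filter_map genres g]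
  rfl

theorem pvAFold_keys (genres : List String) (plays : List Int) :
    (pvAFold genres plays).1.keys = pvGs genres := by
  rw [pvAFold_eq]
  show ((PySem.List.enumerate genres 0).foldl
      (fun d p => d.modify p.2 [] (fun l => l ++ [p.1])) (PySem.Dict.mk [])).keys = _
  rw [PySem.Dict.keys_foldl_modify_key (PySem.List.enumerate genres 0) (fun p => p.2) []
    (fun d p => fun l => l ++ [p.1]) (PySem.Dict.mk [])]
  rw [PySem.List.map_snd_enumerate]
  show PySem.Set.update (PySem.Dict.mk ([] : List (String × List Int))).keys genres = _
  rw [show (PySem.Dict.mk ([] : List (String × List Int))).keys = [] from rfl]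
  show List.foldl PySem.Set.add [] genres = _
  rw [← PySem.Set.ofList_eq_foldl, ← PySem.List.dedup_eq_ofList]
  rfl

theorem pvAFold_tot_getD (genres : List String) (plays : List Int) (g : String) :
    (pvAFold genres plays).2.getD g 0 = pvTot genres plays g := by
  rw [pvAFold_eq]
  show ((PySem.List.enumerate genres 0).foldl
      (fun d p => d.modify p.2 0 (fun t => t + PySem.List.pyGetD plays p.1 0))
      (PySem.Dict.mk [])).getD g 0 = _
  rw [pvGetD_foldl_modify_add (fun p : Int × String => p.2)
    (fun p : Int × String => PySem.List.pyGetD plays p.1 0)]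
  have : (PySem.Dict.mk [] : PySem.Dict String Int).getD g 0 = 0 := by
    simp [PySem.Dict.getD_eq_get?_getD, PySem.Dict.get?]
  rw [this, zero_add]
  unfold pvTot
  rw [← pvEnum_filter_map genres g, List.map_map]
  rfl

def pvBStep (plays : List Int)
    (tf : PySem.Dict String Int × PySem.Dict String Int) (p : Int × String) :
    PySem.Dict String Int × PySem.Dict String Int :=
  let tf' := if tf.1.contains p.2 then tf else (tf.1.insert p.2 0, tf.2.insert p.2 p.1)
  (tf'.1.modify p.2 0 (fun t => t + PySem.List.pyGetD plays p.1 0), tf'.2)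

theorem pvTot_of_not_mem (gl : List String) (plays : List Int) (g : String) (h : g ∉ gl) :
    pvTot gl plays g = 0 := by
  unfold pvTot
  have : pvIds gl g = [] := by
    by_contra hne
    exact h ((pvIds_ne_nil_iff gl g).mp hne)
  simp [this]

theorem pvBFold_inv (plays : List Int) (gl : List String) :
    (∀ g, ((PySem.List.enumerate gl 0).foldl (pvBStep plays)
        (PySem.Dict.mk [], PySem.Dict.mk [])).1.get? g
      = if g ∈ gl then some (pvTot gl plays g) else none)
    ∧ (∀ g, ((PySem.List.enumerate gl 0).foldl (pvBStep plays)
        (PySem.Dict.mk [], PySem.Dict.mk [])).2.get? g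
      = if g ∈ gl then some (pvFst gl g) else none) := by
  induction gl using List.reverseRecOn with
  | nil =>
    constructor <;> (intro g; simp [PySem.List.enumerate, PySem.Dict.get?])
  | append_singleton l x ih =>
    rw [PySem.List.enumerate_append, List.foldl_append]
    rw [show PySem.List.enumerate [x] ((0 : Int) + (l.length : Int))
      = [(((0 : Int) + (l.length : Int)), x)] from rfl]
    simp only [List.foldl_cons, List.foldl_nil]
    set st := (PySem.List.enumerate l 0).foldl (pvBStep plays)
      (PySem.Dict.mk [], PySem.Dict.mk []) with hst
    obtain ⟨ih1, ih2⟩ := ih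
    have hcont : st.1.contains x = decide (x ∈ l) := by
      rw [PySem.Dict.contains_eq_isSome_get?, ih1 x]
      by_cases h : x ∈ l <;> simp [h]
    by_cases hx : x ∈ l
    · have hstep : pvBStep plays st ((0 : Int) + (l.length : Int), x)
          = (st.1.modify x 0 (fun t => t + PySem.List.pyGetD plays ((0 : Int) + (l.length : Int)) 0), st.2) := by
        unfold pvBStep
        rw [hcont]
        simp [hx]
      rw [hstep]
      constructor
      · intro g
        show (st.1.modify x 0 _).get? g = _
        rw [show st.1.modify x 0 (fun t => t + PySem.List.pyGetD plays ((0 : Int) + (l.length : Int)) 0)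
          = st.1.insert x (st.1.getD x 0 + PySem.List.pyGetD plays ((0 : Int) + (l.length : Int)) 0) from rfl]
        rw [PySem.Dict.get?_insert]
        by_cases hg : g = x
        · subst hg
          rw [if_pos rfl, if_pos (by simp [hx])]
          rw [PySem.Dict.getD_eq_get?_getD, ih1 g, if_pos hx]
          rw [pvTot_append l plays g g, if_pos rfl]
          simp [pvPAt, List.getD_eq_getElem?_getD]
        · rw [if_neg hg, ih1 g]
          have hmem : (g ∈ l ++ [x]) ↔ (g ∈ l) := by simp [hg]
          by_cases hgl : g ∈ l
          · rw [if_pos hgl, if_pos (hmem.mpr hgl)]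
            rw [pvTot_append l plays x g, if_neg (fun e => hg e.symm)]
            simp
          · rw [if_neg hgl, if_neg (fun h => hgl (hmem.mp h))]
      · intro g
        show st.2.get? g = _
        rw [ih2 g]
        by_cases hgl : g ∈ l
        · rw [if_pos hgl, if_pos (by simp [hgl])]
          rw [pvFst_append_of_mem l x g hgl]
        · rw [if_neg hgl, if_neg (by simp [hgl]; intro he; subst he; exact hgl hx)]
    · have hstep : pvBStep plays st ((0 : Int) + (l.length : Int), x)
          = ((st.1.insert x 0).modify x 0 (fun t => t + PySem.List.pyGetD plays ((0 : Int) + (l.length : Int)) 0),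
             st.2.insert x ((0 : Int) + (l.length : Int))) := by
        unfold pvBStep
        rw [hcont]
        simp [hx]
      rw [hstep]
      constructor
      · intro g
        show ((st.1.insert x 0).modify x 0 _).get? g = _
        rw [show (st.1.insert x 0).modify x 0 (fun t => t + PySem.List.pyGetD plays ((0 : Int) + (l.length : Int)) 0)
          = (st.1.insert x 0).insert x ((st.1.insert x 0).getD x 0 + PySem.List.pyGetD plays ((0 : Int) + (l.length : Int)) 0) from rfl]
        rw [PySem.Dict.insert_insert_self]
        rw [PySem.Dict.get?_insert]
        by_cases hg : g = x
        · subst hg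
          rw [if_pos rfl, if_pos (by simp)]
          rw [PySem.Dict.getD_insert_self]
          rw [pvTot_append l plays g g, if_pos rfl, pvTot_of_not_mem l plays g hx]
          simp [pvPAt, List.getD_eq_getElem?_getD]
        · rw [if_neg hg, ih1 g]
          have hmem : (g ∈ l ++ [x]) ↔ (g ∈ l) := by simp [hg]
          by_cases hgl : g ∈ l
          · rw [if_pos hgl, if_pos (hmem.mpr hgl)]
            rw [pvTot_append l plays x g, if_neg (fun e => hg e.symm)]
            simp
          · rw [if_neg hgl, if_neg (fun h => hgl (hmem.mp h))]
      · intro g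
        show (st.2.insert x _).get? g = _
        rw [PySem.Dict.get?_insert]
        by_cases hg : g = x
        · subst hg
          rw [if_pos rfl, if_pos (by simp)]
          rw [pvFst_append_last l g hx]
          simp
        · rw [if_neg hg, ih2 g]
          have hmem : (g ∈ l ++ [x]) ↔ (g ∈ l) := by simp [hg]
          by_cases hgl : g ∈ l
          · rw [if_pos hgl, if_pos (hmem.mpr hgl)]
            rw [pvFst_append_of_mem l x g hgl]
          · rw [if_neg hgl, if_neg (fun h => hgl (hmem.mp h))]

def pvKeyS (plays : List Int) (i : Int) : Lex (Int × Int) := toLex (-(pvPAt plays i), i)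
def pvKeyG (genres : List String) (plays : List Int) (i : Int) : Lex (Int × Int) :=
  toLex (-(pvTot genres plays (pvGAt genres i)), pvFst genres (pvGAt genres i))

theorem pvKeyS_inj (plays : List Int) (a b : Int) (h : pvKeyS plays a = pvKeyS plays b) :
    a = b := by
  unfold pvKeyS at h
  have := congrArg (fun x => (ofLex x).2) h
  simpa using this

theorem pvSortIds_eq_sorted (genres : List String) (plays : List Int) (g : String) :
    pvSortIds genres plays g
      = PySem.List.sorted (pvIds genres g) (pvKeyS plays) false := by
  unfold pvSortIds
  exact pvSorted2_eq_sorted_toLex (pvIds genres g) (fun i => -(pvPAt plays i)) (fun i => i) false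

theorem pvSortIds_perm (genres : List String) (plays : List Int) (g : String) :
    (pvSortIds genres plays g).Perm (pvIds genres g) := by
  rw [pvSortIds_eq_sorted]
  exact PySem.List.sorted_perm _ _ _

theorem pvMem_sortIds (genres : List String) (plays : List Int) (g : String) (i : Int) :
    i ∈ pvSortIds genres plays g ↔ i ∈ pvIds genres g :=
  (pvSortIds_perm genres plays g).mem_iff

theorem pvSortIds_pairwise (genres : List String) (plays : List Int) (g : String) :
    (pvSortIds genres plays g).Pairwise (fun a b => pvKeyS plays a < pvKeyS plays b) := by
  rw [pvSortIds_eq_sorted]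
  apply pvPairwise_strict_of_le_of_nodup _ (pvKeyS plays) (pvKeyS_inj plays)
  · exact PySem.List.sorted_pairwise _ _
  · exact ((PySem.List.sorted_perm _ _ _).nodup_iff).mpr (pvIds_nodup genres g)

theorem pvSG_pairwise (genres : List String) (plays : List Int) :
    (pvSG genres plays).Pairwise (fun a b =>
      pvTot genres plays b < pvTot genres plays a
      ∨ (pvTot genres plays a = pvTot genres plays b ∧ pvFst genres a < pvFst genres b)) := by
  unfold pvSG
  exact pvSorted_stable_desc (pvGs genres) (pvTot genres plays) (pvFst genres)
    (pvGs_pairwise_fst genres)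

def pvRfin (genres : List String) (plays : List Int) (i j : Int) : Prop :=
  pvTot genres plays (pvGAt genres j) < pvTot genres plays (pvGAt genres i)
  ∨ (pvTot genres plays (pvGAt genres i) = pvTot genres plays (pvGAt genres j)
     ∧ (pvFst genres (pvGAt genres i) < pvFst genres (pvGAt genres j)
        ∨ (pvFst genres (pvGAt genres i) = pvFst genres (pvGAt genres j)
           ∧ pvKeyS plays i < pvKeyS plays j)))

theorem pvRfin_asymm (genres : List String) (plays : List Int) :
    ∀ a b, pvRfin genres plays a b → ¬ pvRfin genres plays b a := by
  intro a b h1 h2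
  unfold pvRfin at h1 h2
  rcases h1 with h1 | ⟨e1, h1⟩ <;> rcases h2 with h2 | ⟨e2, h2⟩
  · exact lt_asymm h1 h2
  · exact ne_of_lt h1 e2
  · exact ne_of_lt h2 e1
  · rcases h1 with h1 | ⟨f1, h1⟩ <;> rcases h2 with h2 | ⟨f2, h2⟩
    · exact lt_asymm h1 h2
    · exact ne_of_lt h1 f2.symm
    · exact ne_of_lt h2 f1.symm
    · exact lt_asymm h1 h2

theorem pvFlatten_map_perm {α β : Type} (l : List α) (f f' : α → List β)
    (h : ∀ x ∈ l, (f x).Perm (f' x)) :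
    ((l.map f).flatten).Perm ((l.map f').flatten) := by
  induction l with
  | nil => simp
  | cons x t ih =>
    simp only [List.map_cons, List.flatten_cons]
    exact (h x (by simp)).append (ih (fun y hy => h y (by simp [hy])))

theorem pvGAt_of_mem_sortIds (genres : List String) (plays : List Int) (g : String) (i : Int)
    (h : i ∈ pvSortIds genres plays g) : pvGAt genres i = g :=
  ((pvMem_ids genres g i).mp ((pvMem_sortIds genres plays g i).mp h)).2

theorem pvFlattenA_pairwise (genres : List String) (plays : List Int) :
    (((pvSG genres plays).map (pvSortIds genres plays)).flatten).Pairwise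
      (pvRfin genres plays) := by
  rw [List.pairwise_flatten]
  constructor
  · intro l hl
    rcases List.mem_map.mp hl with ⟨g, hg, rfl⟩
    apply (pvSortIds_pairwise genres plays g).imp_of_mem
    intro a b ha hb hk
    unfold pvRfin
    rw [pvGAt_of_mem_sortIds genres plays g a ha, pvGAt_of_mem_sortIds genres plays g b hb]
    exact Or.inr ⟨rfl, Or.inr ⟨rfl, hk⟩⟩
  · rw [List.pairwise_map]
    apply (pvSG_pairwise genres plays).imp_of_mem
    intro a b _ _ hr x hx y hy
    unfold pvRfin
    rw [pvGAt_of_mem_sortIds genres plays a x hx, pvGAt_of_mem_sortIds genres plays b y hy]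
    rcases hr with hr | ⟨he, hf⟩
    · exact Or.inl hr
    · exact Or.inr ⟨he, Or.inl hf⟩

theorem pvSG_perm_gs (genres : List String) (plays : List Int) :
    (pvSG genres plays).Perm (pvGs genres) := PySem.List.sorted_perm _ _ _

theorem pvSG_nodup (genres : List String) (plays : List Int) : (pvSG genres plays).Nodup :=
  ((pvSG_perm_gs genres plays).nodup_iff).mpr (PySem.List.nodup_dedup genres)

theorem pvFlattenA_perm (genres : List String) (plays : List Int) :
    ((((pvSG genres plays).map (pvSortIds genres plays)).flatten)).Perm (pvR genres) := by
  have h1 : ((((pvSG genres plays).map (pvSortIds genres plays)).flatten)).Perm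
      (((pvSG genres plays).map (pvIds genres)).flatten) :=
    pvFlatten_map_perm _ _ _ (fun g _ => pvSortIds_perm genres plays g)
  have h2 : (((pvSG genres plays).map (pvIds genres)).flatten).Perm
      (((pvGs genres).map (pvIds genres)).flatten) :=
    List.Perm.flatten ((pvSG_perm_gs genres plays).map _)
  have h3 : (((pvGs genres).map (pvIds genres)).flatten).Perm (pvR genres) := by
    apply pvFlatten_filter_perm (pvGAt genres) (pvGs genres) (pvR genres)
      (PySem.List.nodup_dedup genres)
    intro i hi
    exact (pvMem_gs genres _).mpr (pvGAt_mem genres i hi)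
  exact (h1.trans h2).trans h3

def pvOrd (genres : List String) (plays : List Int) : List Int :=
  PySem.List.sorted (PySem.List.sorted (pvR genres) (pvKeyS plays) false)
    (pvKeyG genres plays) false

theorem pvOrd1_pairwise (genres : List String) (plays : List Int) :
    (PySem.List.sorted (pvR genres) (pvKeyS plays) false).Pairwise
      (fun a b => pvKeyS plays a < pvKeyS plays b) := by
  apply pvPairwise_strict_of_le_of_nodup _ (pvKeyS plays) (pvKeyS_inj plays)
  · exact PySem.List.sorted_pairwise _ _
  · exact ((PySem.List.sorted_perm _ _ _).nodup_iff).mpr (pvR_nodup genres)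

theorem pvOrd_pairwise (genres : List String) (plays : List Int) :
    (pvOrd genres plays).Pairwise (pvRfin genres plays) := by
  unfold pvOrd
  have := pvSorted_stable_asc (PySem.List.sorted (pvR genres) (pvKeyS plays) false)
    (pvKeyG genres plays) (pvKeyS plays) (pvOrd1_pairwise genres plays)
  apply this.imp
  intro a b h
  unfold pvRfin
  unfold pvKeyG at h
  rcases h with h | ⟨he, hs⟩
  · rw [Prod.Lex.lt_iff] at h
    simp only [ofLex_toLex] at h
    rcases h with h | ⟨he, hf⟩
    · exact Or.inl (by omega)
    · exact Or.inr ⟨by omega, Or.inl hf⟩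
  · have h1 := congrArg (fun x => (ofLex x).1) he
    have h2 := congrArg (fun x => (ofLex x).2) he
    simp only [ofLex_toLex] at h1 h2
    exact Or.inr ⟨by omega, Or.inr ⟨h2, hs⟩⟩

theorem pvOrd_perm (genres : List String) (plays : List Int) :
    (pvOrd genres plays).Perm (pvR genres) :=
  (PySem.List.sorted_perm _ _ _).trans (PySem.List.sorted_perm _ _ _)

theorem pvOrd_eq_flattenA (genres : List String) (plays : List Int) :
    pvOrd genres plays = ((pvSG genres plays).map (pvSortIds genres plays)).flatten :=
  pvEq_of_perm_of_pairwise_asymm (pvRfin_asymm genres plays) _ _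
    ((pvOrd_perm genres plays).trans (pvFlattenA_perm genres plays).symm)
    (pvOrd_pairwise genres plays)
    (pvFlattenA_pairwise genres plays)

def pvCStep (genres : List String) (st : List Int × PySem.Dict String Int) (i : Int) :
    List Int × PySem.Dict String Int :=
  let g := PySem.List.pyGetD genres i ""
  let c := st.2.getD g 0
  if c < 2 then (st.1 ++ [i], st.2.insert g (c + 1)) else st

theorem pvCStep_eq (genres : List String) (st : List Int × PySem.Dict String Int) (i : Int) :
    pvCStep genres st i
      = if st.2.getD (pvGAt genres i) 0 < 2
        then (st.1 ++ [i], st.2.insert (pvGAt genres i) (st.2.getD (pvGAt genres i) 0 + 1))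
        else st := rfl

theorem pvScan_noop (genres : List String) (g : String) :
    ∀ (l : List Int), (∀ i ∈ l, pvGAt genres i = g) →
    ∀ (acc : List Int) (d : PySem.Dict String Int), ¬ (d.getD g 0 < 2) →
    l.foldl (pvCStep genres) (acc, d) = (acc, d) := by
  intro l
  induction l with
  | nil => intro _ acc d _; rfl
  | cons i t ih =>
    intro hg acc d hd
    simp only [List.foldl_cons]
    rw [pvCStep_eq, hg i (by simp)]
    rw [if_neg hd]
    exact ih (fun j hj => hg j (by simp [hj])) acc d hd

theorem pvScan_block (genres : List String) (g : String) (l : List Int)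
    (hg : ∀ i ∈ l, pvGAt genres i = g) (acc : List Int) (d : PySem.Dict String Int)
    (h0 : d.getD g 0 = 0) :
    ∃ d', l.foldl (pvCStep genres) (acc, d) = (acc ++ l.take 2, d')
      ∧ ∀ g', g' ≠ g → d'.getD g' 0 = d.getD g' 0 := by
  match l with
  | [] => exact ⟨d, by simp, fun _ _ => rfl⟩
  | [a] =>
    refine ⟨d.insert g 1, ?_, ?_⟩
    · simp only [List.foldl_cons, List.foldl_nil]
      rw [pvCStep_eq, hg a (by simp), h0]
      norm_num
    · intro g' hne
      rw [PySem.Dict.getD_insert, if_neg hne]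
  | a :: b :: t =>
    refine ⟨(d.insert g 1).insert g 2, ?_, ?_⟩
    · simp only [List.foldl_cons]
      have ha : pvCStep genres (acc, d) a = (acc ++ [a], d.insert g 1) := by
        rw [pvCStep_eq, hg a (by simp), h0]
        norm_num
      have hb : pvCStep genres (acc ++ [a], d.insert g 1) b
          = (acc ++ [a] ++ [b], (d.insert g 1).insert g 2) := by
        rw [pvCStep_eq, hg b (by simp), PySem.Dict.getD_insert_self]
        norm_num
      rw [ha, hb]
      rw [pvScan_noop genres g t (fun j hj => hg j (by simp [hj])) _ _
        (by rw [PySem.Dict.getD_insert_self]; norm_num)]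
      simp
    · intro g' hne
      rw [PySem.Dict.getD_insert, if_neg hne, PySem.Dict.getD_insert, if_neg hne]

theorem pvScan_main (genres : List String) (blocks : String → List Int) :
    ∀ (SGl : List String), SGl.Nodup →
    (∀ g ∈ SGl, ∀ i ∈ blocks g, pvGAt genres i = g) →
    ∀ (acc : List Int) (d : PySem.Dict String Int), (∀ g ∈ SGl, d.getD g 0 = 0) →
    (((SGl.map blocks).flatten).foldl (pvCStep genres) (acc, d)).1
      = acc ++ (SGl.map (fun g => (blocks g).take 2)).flatten := by
  intro SGl
  induction SGl with
  | nil => intro _ _ acc d _; simp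
  | cons g t ih =>
    intro hnd hhom acc d hd0
    simp only [List.map_cons, List.flatten_cons]
    rw [List.foldl_append]
    obtain ⟨d', hstep, hother⟩ := pvScan_block genres g (blocks g)
      (hhom g (by simp)) acc d (hd0 g (by simp))
    rw [hstep]
    rw [ih (List.nodup_cons.mp hnd).2 (fun g' hg' => hhom g' (by simp [hg']))
      (acc ++ (blocks g).take 2) d' ?_]
    · simp
    · intro g' hg'
      have hne : g' ≠ g := by
        intro e
        exact (List.nodup_cons.mp hnd).1 (e ▸ hg')
      rw [hother g' hne]
      exact hd0 g' (by simp [hg'])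

theorem pvA_output (genres : List String) (plays : List Int) :
    solution genres plays
      = ((pvSG genres plays).map (fun g => (pvSortIds genres plays g).take 2)).flatten := by
  show (PySem.List.sorted (pvAFold genres plays).1.keys
      (fun genre => (pvAFold genres plays).2.getD genre 0) true).foldl
      (fun ans genre =>
        ans ++ PySem.List.slice
          (PySem.List.sorted2 ((pvAFold genres plays).1.getD genre [])
            (fun id => -(PySem.List.pyGetD plays id 0)) (fun id => id) false)
          none (some 2)) [] = _
  rw [pvAFold_keys]
  rw [show (fun genre => (pvAFold genres plays).2.getD genre 0) = pvTot genres plays from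
    funext (pvAFold_tot_getD genres plays)]
  rw [PySem.List.foldl_append_eq_flatMap
    (fun genre => PySem.List.slice
      (PySem.List.sorted2 ((pvAFold genres plays).1.getD genre [])
        (fun id => -(PySem.List.pyGetD plays id 0)) (fun id => id) false)
      none (some 2))]
  rw [List.nil_append, List.flatMap_def]
  rw [show PySem.List.sorted (pvGs genres) (pvTot genres plays) true = pvSG genres plays
    from rfl]
  congr 1
  apply List.map_congr_left
  intro g _
  rw [pvAFold_ids_getD]
  rw [PySem.List.slice_to _ (by norm_num : (0:Int) ≤ 2)]
  rfl

theorem pvB_output (genres : List String) (plays : List Int) :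
    solution_alt genres plays
      = (((pvOrd genres plays).foldl (pvCStep genres) ([], PySem.Dict.mk [])).1) := by
  show ((PySem.List.sorted2
      (PySem.List.sorted2 (PySem.List.pyRange 0 (genres.length : Int) 1)
        (fun i => -(PySem.List.pyGetD plays i 0)) (fun i => i) false)
      (fun i => -(((PySem.List.enumerate genres 0).foldl (pvBStep plays)
          (PySem.Dict.mk [], PySem.Dict.mk [])).1.getD (PySem.List.pyGetD genres i "") 0))
      (fun i => ((PySem.List.enumerate genres 0).foldl (pvBStep plays)
          (PySem.Dict.mk [], PySem.Dict.mk [])).2.getD (PySem.List.pyGetD genres i "") 0)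
      false).foldl (pvCStep genres) ([], PySem.Dict.mk [])).1 = _
  rw [pvSorted2_eq_sorted_toLex, pvSorted2_eq_sorted_toLex]
  rw [show (fun i => toLex (-(PySem.List.pyGetD plays i 0), i)) = pvKeyS plays from rfl]
  rw [show PySem.List.pyRange 0 (genres.length : Int) 1 = pvR genres from rfl]
  have hkey : PySem.List.sorted (PySem.List.sorted (pvR genres) (pvKeyS plays) false)
      (fun i => toLex
        (-(((PySem.List.enumerate genres 0).foldl (pvBStep plays)
            (PySem.Dict.mk [], PySem.Dict.mk [])).1.getD (PySem.List.pyGetD genres i "") 0),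
         ((PySem.List.enumerate genres 0).foldl (pvBStep plays)
            (PySem.Dict.mk [], PySem.Dict.mk [])).2.getD (PySem.List.pyGetD genres i "") 0))
      false
      = pvOrd genres plays := by
    unfold pvOrd
    apply pvSorted_key_congr
    intro i hi
    have hiR : i ∈ pvR genres := by
      rwa [(PySem.List.sorted_perm (pvR genres) (pvKeyS plays) false).mem_iff] at hi
    have hmem : pvGAt genres i ∈ genres := pvGAt_mem genres i hiR
    obtain ⟨inv1, inv2⟩ := pvBFold_inv plays genres
    unfold pvKeyG
    rw [show PySem.List.pyGetD genres i "" = pvGAt genres i from rfl]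
    rw [PySem.Dict.getD_eq_get?_getD, inv1 (pvGAt genres i), if_pos hmem]
    rw [PySem.Dict.getD_eq_get?_getD, inv2 (pvGAt genres i), if_pos hmem]
    rfl
  rw [hkey]

-- ===== VERDICT (by name: the statement is the Claim_ definition above) =====
theorem solution_spec : Claim_equal_solution := by
  unfold Claim_equal_solution
  intro genres plays _ _
  unfold Spec_solution
  rw [pvA_output, pvB_output, pvOrd_eq_flattenA]
  rw [pvScan_main genres (pvSortIds genres plays) (pvSG genres plays)
    (pvSG_nodup genres plays)
    (fun g _ i hi => pvGAt_of_mem_sortIds genres plays g i hi)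
    [] (PySem.Dict.mk [])
    (fun g _ => by simp [PySem.Dict.getD_eq_get?_getD, PySem.Dict.get?])]
  rw [List.nil_append]
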